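-- pv_equiv track=rewrite | github.com/PrinceSinghhub/GFG-Questions | Maximize The Array 1.py | maximizeArray
-- ===== SOURCE A (Python) =====
-- import heapq
--
-- def maximizeArray(arr1, arr2, n):
--     heap = []
--     heapq.heapify(heap)
--     for i in range(n):
--         heapq.heappush(heap, (-arr2[i], 0, i))
--         heapq.heappush(heap, (-arr1[i], 1, i))
--     i1 = []
--     i2 = []
--     used = set()
--     k = 0
--     while k < n and heap:
--         ele, ar, ind = heapq.heappop(heap)
--         if ar == 1 and ele not in used:
--             i1.append(ind)
--             used.add(ele)
--             k += 1
--         elif ar == 0 and ele not in used: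
--             i2.append(ind)
--             used.add(ele)
--             k += 1
--
--     i1.sort()
--     i2.sort()
--     ans = []
--     for i in i2:
--         ans.append(arr2[i])
--     for i in i1:
--         ans.append(arr1[i])
--     return ans
-- ===== SOURCE B (Python) =====
-- def maximizeArray(arr1, arr2, n):
--     best = {}
--     for i in range(n):
--         best.setdefault(arr2[i], (0, i))
--     for i in range(n):
--         best.setdefault(arr1[i], (1, i))
--     top = sorted(best, reverse=True)[:n]
--     chosen = sorted((f, i, v) for v in top for f, i in [best[v]])
--     return [v for _, _, v in chosen]
-- ===== Notes on version B (the rewrite author's own statement) =====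
-- stated objective: simpler
-- what changed: Replaces the heap of 2n (-value,flag,index) triples and the pop-until-n-distinct loop by a first-occurrence dict over the two prefixes (arr2 scanned before arr1), one descending sort of the distinct values truncated to n, and one sort of the chosen (flag,index,value) triples.
import Mathlib
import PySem

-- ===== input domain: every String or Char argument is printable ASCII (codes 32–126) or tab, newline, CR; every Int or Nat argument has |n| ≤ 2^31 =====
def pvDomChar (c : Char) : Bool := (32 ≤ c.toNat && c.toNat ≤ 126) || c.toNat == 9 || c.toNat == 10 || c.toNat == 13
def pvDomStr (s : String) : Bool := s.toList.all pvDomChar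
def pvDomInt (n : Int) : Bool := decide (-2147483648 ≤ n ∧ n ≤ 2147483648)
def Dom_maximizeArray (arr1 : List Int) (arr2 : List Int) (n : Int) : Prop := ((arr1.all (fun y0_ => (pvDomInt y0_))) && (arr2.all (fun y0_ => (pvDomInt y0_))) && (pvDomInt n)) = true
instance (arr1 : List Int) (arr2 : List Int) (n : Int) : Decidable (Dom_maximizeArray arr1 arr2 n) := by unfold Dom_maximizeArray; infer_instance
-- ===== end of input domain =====

-- B replaces A's heap-of-all-pairs with a first-occurrence dict over the two prefixes and one
-- descending sort of the distinct values (objective: simpler).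

-- ===== PORT A =====
-- heapq is ported by its observable contract: the heap list is kept sorted by the Python tuple
-- order on (-value, flag, index) — encoded injectively on the admitted inputs (|ints| ≤ 2^31,
-- flag ∈ {0,1}, 0 ≤ index) by pvKey — with heappush = ordered insert and heappop = take the
-- head (the minimum).  Exact here because all pushed triples are distinct.
def pvKey (e : Int × Int × Int) : Int := (e.1 * 2 + e.2.1) * 8589934592 + e.2.2

def pvHeapPush (h : List (Int × Int × Int)) (e : Int × Int × Int) : List (Int × Int × Int) :=
  PySem.List.insertBy (fun a b => decide (pvKey a < pvKey b)) e h

def pvPopLoop (n : Int) : List (Int × Int × Int) → Int → PySem.Set Int → List Int → List Int → List Int × List Int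
  | heap, k, used, i1, i2 =>
    if k < n then
      match heap with
      | [] => (i1, i2)
      | (ele, ar, ind) :: rest =>
        if ar == 1 && !(PySem.Set.contains used ele) then
          pvPopLoop n rest (k + 1) (PySem.Set.add used ele) (i1 ++ [ind]) i2
        else if ar == 0 && !(PySem.Set.contains used ele) then
          pvPopLoop n rest (k + 1) (PySem.Set.add used ele) i1 (i2 ++ [ind])
        else
          pvPopLoop n rest k used i1 i2
    else (i1, i2)

def maximizeArray (arr1 : List Int) (arr2 : List Int) (n : Int) : List Int :=
  let heap := (PySem.List.pyRange 0 n 1).foldl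
    (fun h i => pvHeapPush (pvHeapPush h (-(PySem.List.pyGetD arr2 i 0), 0, i)) (-(PySem.List.pyGetD arr1 i 0), 1, i)) []
  let p := pvPopLoop n heap 0 PySem.Set.empty [] []
  let i1 := PySem.List.sorted p.1 (fun x => x) false
  let i2 := PySem.List.sorted p.2 (fun x => x) false
  let ans := i2.foldl (fun acc i => acc ++ [PySem.List.pyGetD arr2 i 0]) []
  i1.foldl (fun acc i => acc ++ [PySem.List.pyGetD arr1 i 0]) ans

-- ===== PORT B =====
-- Python's tuple comparison on (flag, index, value) is ported by the injective monotone
-- integer encoding pvKeyB (exact on the admitted inputs: flag ∈ {0,1}, 0 ≤ index ≤ 2^31,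
-- |value| ≤ 2^31).
def pvKeyB (t : Int × Int × Int) : Int := (t.1 * 8589934592 + t.2.1) * 17179869184 + t.2.2

def maximizeArray_alt (arr1 : List Int) (arr2 : List Int) (n : Int) : List Int :=
  let best0 := (PySem.List.pyRange 0 n 1).foldl
    (fun d i => PySem.Dict.setdefault d (PySem.List.pyGetD arr2 i 0) (0, i)) PySem.Dict.empty
  let best := (PySem.List.pyRange 0 n 1).foldl
    (fun d i => PySem.Dict.setdefault d (PySem.List.pyGetD arr1 i 0) (1, i)) best0
  let top := PySem.List.slice (PySem.List.sorted (PySem.Dict.keys best) (fun v => v) true) none (some n)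
  let chosen := PySem.List.sorted
    (top.map (fun v => ((PySem.Dict.getD best v (0, 0)).1, (PySem.Dict.getD best v (0, 0)).2, v)))
    pvKeyB false
  chosen.map (fun t => t.2.2)

-- ===== PRECONDITION & SPEC =====
-- Pre_ excludes exactly the inputs where A raises IndexError: n larger than either list.
def Pre_maximizeArray (arr1 : List Int) (arr2 : List Int) (n : Int) : Prop :=
  n ≤ (arr1.length : Int) ∧ n ≤ (arr2.length : Int)
instance (arr1 : List Int) (arr2 : List Int) (n : Int) : Decidable (Pre_maximizeArray arr1 arr2 n) := by unfold Pre_maximizeArray; infer_instance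

def pvWitness_maximizeArray : List Int × List Int × Int := ([3, 1], [2, 3], 2)

def Spec_maximizeArray (arr1 : List Int) (arr2 : List Int) (n : Int) (out : List Int) : Prop := out = maximizeArray_alt arr1 arr2 n
instance (arr1 : List Int) (arr2 : List Int) (n : Int) (out : List Int) : Decidable (Spec_maximizeArray arr1 arr2 n out) := by unfold Spec_maximizeArray; infer_instance

-- ===== CLAIM (what is proved, stated in full; the proofs are below) =====
def Claim_equal_maximizeArray : Prop := ∀ (arr1 : List Int) (arr2 : List Int) (n : Int), Dom_maximizeArray arr1 arr2 n → Pre_maximizeArray arr1 arr2 n → Spec_maximizeArray arr1 arr2 n (maximizeArray arr1 arr2 n)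

-- ===== LEMMAS AND PROOFS =====

-- dedup-by-first-component with a seen-set (the shape of A's pop loop after the budget is split off)
def pvDedupFst : List (Int × Int × Int) → PySem.Set Int → List (Int × Int × Int)
  | [], _ => []
  | e :: rest, seen =>
    if PySem.Set.contains seen e.1 then pvDedupFst rest seen
    else e :: pvDedupFst rest (PySem.Set.add seen e.1)

-- the selected entries of A's pop loop, in pop order
def pvSel (n : Int) : List (Int × Int × Int) → Int → PySem.Set Int → List (Int × Int × Int)
  | [], _, _ => []
  | e :: rest, k, used =>
    if k < n then
      if PySem.Set.contains used e.1 then pvSel n rest k used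
      else e :: pvSel n rest (k + 1) (PySem.Set.add used e.1)
    else []

theorem pvSel_eq_take_dedup (n : Int) (heap : List (Int × Int × Int)) (k : Int) (used : PySem.Set Int) :
    pvSel n heap k used = (pvDedupFst heap used).take (n - k).toNat := by
  induction heap generalizing k used with
  | nil => simp [pvSel, pvDedupFst]
  | cons e rest ih =>
    by_cases hk : k < n
    · by_cases hc : e.1 ∈ used
      · simp [pvSel, pvDedupFst, hk, hc, ih]
      · have hkk : (n - k).toNat = (n - (k + 1)).toNat + 1 := by omega
        simp [pvSel, pvDedupFst, hk, hc, hkk, ih]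
    · have hkk : (n - k).toNat = 0 := by omega
      simp [pvSel, pvDedupFst, hk, hkk]

theorem pvPopLoop_eq (n : Int) (heap : List (Int × Int × Int)) (k : Int) (used : PySem.Set Int)
    (i1 i2 : List Int) (hf : ∀ e ∈ heap, e.2.1 = 0 ∨ e.2.1 = 1) :
    pvPopLoop n heap k used i1 i2 =
      (i1 ++ ((pvSel n heap k used).filter (fun e => e.2.1 == 1)).map (fun e => e.2.2),
       i2 ++ ((pvSel n heap k used).filter (fun e => e.2.1 == 0)).map (fun e => e.2.2)) := by
  induction heap generalizing k used i1 i2 with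
  | nil => simp [pvPopLoop, pvSel]
  | cons e rest ih =>
    obtain ⟨ele, ar, ind⟩ := e
    have hfe := hf (ele, ar, ind) (List.mem_cons_self)
    have hf' : ∀ e ∈ rest, e.2.1 = 0 ∨ e.2.1 = 1 := fun e he => hf e (List.mem_cons_of_mem _ he)
    by_cases hk : k < n
    · by_cases hc : ele ∈ used
      · rcases hfe with h0 | h1 <;>
          simp_all [pvPopLoop, pvSel]
      · rcases hfe with h0 | h1 <;>
          simp_all [pvPopLoop, pvSel]
    · simp [pvPopLoop, pvSel, hk]

-- bounds every component of a pushed triple satisfies on the admitted inputs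
def pvBnd (e : Int × Int × Int) : Prop :=
  (-2147483648 ≤ e.1 ∧ e.1 ≤ 2147483648) ∧ (e.2.1 = 0 ∨ e.2.1 = 1) ∧ (0 ≤ e.2.2 ∧ e.2.2 ≤ 2147483648)

theorem pvKey_inj {a b : Int × Int × Int} (ha : pvBnd a) (hb : pvBnd b) (h : pvKey a = pvKey b) : a = b := by
  obtain ⟨a1, a2, a3⟩ := a; obtain ⟨b1, b2, b3⟩ := b
  obtain ⟨ha1, ha2, ha3⟩ := ha; obtain ⟨hb1, hb2, hb3⟩ := hb
  simp only [pvKey] at h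
  dsimp only at ha1 ha2 ha3 hb1 hb2 hb3 h
  simp only [Prod.mk.injEq]
  rcases ha2 with h2 | h2 <;> rcases hb2 with h2' | h2' <;> (subst h2; subst h2'; omega)

theorem pvKey_fst_le {a b : Int × Int × Int} (ha : pvBnd a) (hb : pvBnd b) (h : pvKey a < pvKey b) : a.1 ≤ b.1 := by
  obtain ⟨a1, a2, a3⟩ := a; obtain ⟨b1, b2, b3⟩ := b
  obtain ⟨ha1, ha2, ha3⟩ := ha; obtain ⟨hb1, hb2, hb3⟩ := hb
  simp only [pvKey] at h
  dsimp only at ha1 ha2 ha3 hb1 hb2 hb3 h ⊢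
  rcases ha2 with h2 | h2 <;> rcases hb2 with h2' | h2' <;> (subst h2; subst h2'; omega)

-- key order of entries with the same value: flag first, then index
theorem pvKey_lt_same_fst {v f i f' i' : Int} (hi : 0 ≤ i ∧ i ≤ 2147483648) (hi' : 0 ≤ i' ∧ i' ≤ 2147483648)
    (h : f < f' ∨ (f = f' ∧ i < i')) : pvKey (v, f, i) < pvKey (v, f', i') := by
  simp only [pvKey]
  rcases h with h | ⟨rfl, h⟩ <;> omega

theorem pvKeyB_lt {f i v f' i' v' : Int}
    (hv : -2147483648 ≤ v ∧ v ≤ 2147483648) (hv' : -2147483648 ≤ v' ∧ v' ≤ 2147483648)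
    (hi : 0 ≤ i ∧ i ≤ 2147483648) (hi' : 0 ≤ i' ∧ i' ≤ 2147483648)
    (h : f < f' ∨ (f = f' ∧ i < i')) : pvKeyB (f, i, v) < pvKeyB (f', i', v') := by
  simp only [pvKeyB]
  rcases h with h | ⟨rfl, h⟩ <;> omega

-- the pushed entries in push order, and the dict-scan pairs in scan order
def pvE (arr1 arr2 : List Int) (n : Int) : List (Int × Int × Int) :=
  (PySem.List.pyRange 0 n 1).flatMap
    (fun i => [(-(PySem.List.pyGetD arr2 i 0), 0, i), (-(PySem.List.pyGetD arr1 i 0), 1, i)])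

def pvF (arr1 arr2 : List Int) (n : Int) : List (Int × (Int × Int)) :=
  (PySem.List.pyRange 0 n 1).map (fun i => (PySem.List.pyGetD arr2 i 0, ((0 : Int), i))) ++
  (PySem.List.pyRange 0 n 1).map (fun i => (PySem.List.pyGetD arr1 i 0, ((1 : Int), i)))

def pvToE (p : Int × (Int × Int)) : Int × Int × Int := (-p.1, p.2.1, p.2.2)

theorem flatMap_pair_perm {α β : Type} (g h : α → β) (l : List α) :
    (l.flatMap (fun i => [g i, h i])).Perm (l.map g ++ l.map h) := by
  induction l with
  | nil => simp
  | cons x xs ih =>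
    simp only [List.flatMap_cons, List.map_cons, List.cons_append]
    refine ((ih.cons _).cons _).trans ?_
    exact (List.perm_middle.symm.cons _)

theorem pvE_perm_F (arr1 arr2 : List Int) (n : Int) :
    (pvE arr1 arr2 n).Perm ((pvF arr1 arr2 n).map pvToE) := by
  have h := flatMap_pair_perm (fun i => (-(PySem.List.pyGetD arr2 i 0), (0 : Int), i))
    (fun i => (-(PySem.List.pyGetD arr1 i 0), (1 : Int), i)) (PySem.List.pyRange 0 n 1)
  simpa [pvE, pvF, pvToE, List.map_map, Function.comp] using h

theorem foldl_double {α β γ : Type} (f : β → γ → β) (g h : α → γ) (l : List α) (init : β) :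
    l.foldl (fun acc i => f (f acc (g i)) (h i)) init = (l.flatMap (fun i => [g i, h i])).foldl f init := by
  induction l generalizing init with
  | nil => rfl
  | cons x xs ih => simp [List.foldl, ih]

theorem pvDedupFst_sublist (S : List (Int × Int × Int)) (seen : PySem.Set Int) :
    (pvDedupFst S seen).Sublist S := by
  induction S generalizing seen with
  | nil => simp [pvDedupFst]
  | cons e rest ih =>
    by_cases hc : e.1 ∈ seen <;> simp [pvDedupFst, hc]
    · exact (ih seen).cons e
    · exact ih _

theorem mem_pvDedupFst {S : List (Int × Int × Int)} (seen : PySem.Set Int)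
    (hs : S.Pairwise (fun a b => pvKey a < pvKey b)) (x : Int × Int × Int) :
    x ∈ pvDedupFst S seen ↔ x ∈ S ∧ x.1 ∉ seen ∧ ∀ y ∈ S, y.1 = x.1 → pvKey x ≤ pvKey y := by
  induction S generalizing seen with
  | nil => simp [pvDedupFst]
  | cons e rest ih =>
    rw [List.pairwise_cons] at hs
    obtain ⟨he, hrest⟩ := hs
    by_cases hc : e.1 ∈ seen
    · rw [pvDedupFst, if_pos (by simpa [PySem.Set.contains_iff] using hc), ih _ hrest]
      constructor
      · rintro ⟨hx, hxs, hmin⟩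
        refine ⟨List.mem_cons_of_mem _ hx, hxs, ?_⟩
        intro y hy h1
        rcases List.mem_cons.mp hy with rfl | hy'
        · exact absurd (h1.symm) (by intro h1'; exact hxs (h1' ▸ hc))
        · exact hmin y hy' h1
      · rintro ⟨hx, hxs, hmin⟩
        rcases List.mem_cons.mp hx with rfl | hx'
        · exact absurd hc hxs
        · exact ⟨hx', hxs, fun y hy h1 => hmin y (List.mem_cons_of_mem _ hy) h1⟩
    · rw [pvDedupFst, if_neg (by simpa [PySem.Set.contains_iff] using hc), List.mem_cons, ih _ hrest]
      constructor
      · rintro (rfl | ⟨hx, hxs, hmin⟩)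
        · exact ⟨List.mem_cons_self, hc, by
            rintro y hy h1
            rcases List.mem_cons.mp hy with rfl | hy'
            · exact le_refl _
            · exact le_of_lt (he y hy')⟩
        · have hxe : x.1 ≠ e.1 := by
            intro h1; exact hxs (by simp [PySem.Set.mem_add, h1])
          refine ⟨List.mem_cons_of_mem _ hx, fun hmem => hxs (by simp [PySem.Set.mem_add, hmem]), ?_⟩
          intro y hy h1
          rcases List.mem_cons.mp hy with rfl | hy'
          · exact (hxe h1.symm).elim
          · exact hmin y hy' h1
      · rintro ⟨hx, hxs, hmin⟩
        rcases List.mem_cons.mp hx with rfl | hx'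
        · exact Or.inl rfl
        · right
          have hxe : x.1 ≠ e.1 := by
            intro h1
            have := hmin e List.mem_cons_self h1.symm
            exact absurd (he x hx') (not_lt.mpr this)
          exact ⟨hx', by simp [PySem.Set.mem_add, hxs, hxe], fun y hy h1 => hmin y (List.mem_cons_of_mem _ hy) h1⟩

theorem find?_min (F : List (Int × (Int × Int))) (v : Int)
    (hp : F.Pairwise (fun p q => p.1 = q.1 → pvKey (pvToE p) < pvKey (pvToE q)))
    (p : Int × (Int × Int)) (h : F.find? (fun p => p.1 == v) = some p) :
    p ∈ F ∧ p.1 = v ∧ ∀ q ∈ F, q.1 = v → pvKey (pvToE p) ≤ pvKey (pvToE q) := by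
  induction F with
  | nil => simp at h
  | cons a rest ih =>
    rw [List.pairwise_cons] at hp
    obtain ⟨ha, hrest⟩ := hp
    rw [List.find?_cons] at h
    by_cases hav : a.1 = v
    · rw [show (a.1 == v) = true by simpa using hav] at h
      obtain rfl : a = p := by simpa using h
      refine ⟨List.mem_cons_self, hav, ?_⟩
      intro q hq hqv
      rcases List.mem_cons.mp hq with rfl | hq'
      · exact le_refl _
      · exact le_of_lt (ha q hq' (hav.trans hqv.symm))
    · rw [show (a.1 == v) = false by simpa using hav] at h
      obtain ⟨hmem, hpv, hmin⟩ := ih hrest h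
      refine ⟨List.mem_cons_of_mem _ hmem, hpv, ?_⟩
      intro q hq hqv
      rcases List.mem_cons.mp hq with rfl | hq'
      · exact absurd hqv hav
      · exact hmin q hq' hqv

theorem keys_foldl_setdefault (F : List (Int × (Int × Int))) :
    (F.foldl (fun d p => PySem.Dict.setdefault d p.1 p.2) PySem.Dict.empty).keys
      = PySem.Set.ofList (F.map (fun p => p.1)) := by
  suffices h : ∀ (d : PySem.Dict Int (Int × Int)),
      (F.foldl (fun d p => PySem.Dict.setdefault d p.1 p.2) d).keys
        = PySem.Set.update d.keys (F.map (fun p => p.1)) by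
    rw [h PySem.Dict.empty]
    simp [PySem.Set.update_nil_left, PySem.Dict.keys_empty]
  induction F with
  | nil => simp [PySem.Set.update_nil]
  | cons a rest ih =>
    intro d
    simp only [List.foldl_cons, List.map_cons, PySem.Set.update_cons, ih]
    congr 1
    by_cases hc : PySem.Dict.contains d a.1
    · rw [PySem.Dict.setdefault_of_contains d a.2 hc,
        PySem.Set.add_of_mem ((PySem.Dict.contains_iff_mem_keys d a.1).mp hc)]
    · have hc' : PySem.Dict.contains d a.1 = false := by simpa using hc
      rw [PySem.Dict.setdefault_of_not_contains d a.2 hc',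
        PySem.Dict.keys_insert_of_not_contains d a.2 hc',
        PySem.Set.add_of_not_mem (fun hm => hc ((PySem.Dict.contains_iff_mem_keys d a.1).mpr hm))]

theorem get?_foldl_setdefault (F : List (Int × (Int × Int))) (d : PySem.Dict Int (Int × Int)) (x : Int) :
    (F.foldl (fun d p => PySem.Dict.setdefault d p.1 p.2) d).get? x
      = (d.get? x).or ((F.find? (fun p => p.1 == x)).map (fun p => p.2)) := by
  induction F generalizing d with
  | nil => simp
  | cons a rest ih =>
    rw [List.foldl_cons, ih, List.find?_cons]
    by_cases hax : a.1 = x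
    · rw [show (a.1 == x) = true by simpa using hax]
      subst hax
      rw [PySem.Dict.get?_setdefault_self]
      cases hdx : d.get? a.1 <;> simp
    · rw [show (a.1 == x) = false by simpa using hax,
        PySem.Dict.get?_setdefault_of_ne d a.2 (Ne.symm hax)]

theorem pvVal_bnd (arr : List Int) (harr : arr.all (fun y => pvDomInt y) = true) {i : Int}
    (h0 : 0 ≤ i) (hn : i < (arr.length : Int)) :
    -2147483648 ≤ PySem.List.pyGetD arr i 0 ∧ PySem.List.pyGetD arr i 0 ≤ 2147483648 := by
  have hm : PySem.List.pyGetD arr i 0 ∈ arr :=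
    PySem.List.pyGetD_mem arr 0 ⟨by omega, hn⟩
  have := List.all_eq_true.mp harr _ hm
  simpa [pvDomInt] using this

theorem pvE_mem (arr1 arr2 : List Int) (n : Int) (x : Int × Int × Int) :
    x ∈ pvE arr1 arr2 n ↔ ∃ i, (0 ≤ i ∧ i < n) ∧
      (x = (-(PySem.List.pyGetD arr2 i 0), 0, i) ∨ x = (-(PySem.List.pyGetD arr1 i 0), 1, i)) := by
  simp [pvE, List.mem_flatMap, PySem.List.mem_pyRange_one]

theorem pvE_bnd (arr1 arr2 : List Int) (n : Int) (hdom : Dom_maximizeArray arr1 arr2 n)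
    (hpre : Pre_maximizeArray arr1 arr2 n) : ∀ x ∈ pvE arr1 arr2 n, pvBnd x := by
  intro x hx
  unfold Dom_maximizeArray at hdom
  simp only [Bool.and_eq_true] at hdom
  obtain ⟨⟨h1, h2⟩, h3⟩ := hdom
  have hn31 : n ≤ 2147483648 := (by simpa [pvDomInt] using h3 : -2147483648 ≤ n ∧ n ≤ 2147483648).2
  rcases (pvE_mem arr1 arr2 n x).mp hx with ⟨i, ⟨h0, hi⟩, hcase | hcase⟩ <;> subst hcase <;>
    refine ⟨?_, by simp, by simp; omega⟩
  · have := pvVal_bnd arr2 h2 h0 (lt_of_lt_of_le hi hpre.2)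
    simp; omega
  · have := pvVal_bnd arr1 h1 h0 (lt_of_lt_of_le hi hpre.1)
    simp; omega

theorem pvE_nodup (arr1 arr2 : List Int) (n : Int) : (pvE arr1 arr2 n).Nodup := by
  rw [(pvE_perm_F arr1 arr2 n).nodup_iff]
  rw [pvF, List.map_append, List.map_map, List.map_map]
  have hr := PySem.List.nodup_pyRange_one 0 n
  rw [List.nodup_append]
  refine ⟨List.Nodup.map_on ?_ hr, List.Nodup.map_on ?_ hr, ?_⟩
  · intro a _ b _ h; simpa [pvToE] using (congrArg (fun t => t.2.2) h)
  · intro a _ b _ h; simpa [pvToE] using (congrArg (fun t => t.2.2) h)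
  · intro a ha b hb h
    subst h
    simp only [List.mem_map] at ha hb
    obtain ⟨i, _, hi⟩ := ha; obtain ⟨j, _, hj⟩ := hb
    have h1 := congrArg (fun t => t.2.1) hi
    have h2 := congrArg (fun t => t.2.1) hj
    simp only [pvToE, Function.comp] at h1 h2
    rw [← h1] at h2
    simp at h2

theorem pvF_pairwise (arr1 arr2 : List Int) (n : Int) (hdom : Dom_maximizeArray arr1 arr2 n) :
    (pvF arr1 arr2 n).Pairwise (fun p q => p.1 = q.1 → pvKey (pvToE p) < pvKey (pvToE q)) := by
  unfold Dom_maximizeArray at hdom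
  simp only [Bool.and_eq_true] at hdom
  have hn31 : n ≤ 2147483648 := (by simpa [pvDomInt] using hdom.2 : -2147483648 ≤ n ∧ n ≤ 2147483648).2
  have hbi : ∀ i : Int, i ∈ PySem.List.pyRange 0 n 1 → 0 ≤ i ∧ i ≤ 2147483648 := by
    intro i hi
    have := PySem.List.mem_pyRange_one.mp hi
    omega
  rw [pvF, List.pairwise_append]
  refine ⟨?_, ?_, ?_⟩
  · rw [List.pairwise_map]
    refine (PySem.List.pairwise_lt_pyRange_one 0 n).imp_of_mem ?_
    intro a b hma hmb hab heq
    simp only [pvToE] at *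
    rw [heq]
    exact pvKey_lt_same_fst (hbi a hma) (hbi b hmb) (Or.inr ⟨rfl, hab⟩)
  · rw [List.pairwise_map]
    refine (PySem.List.pairwise_lt_pyRange_one 0 n).imp_of_mem ?_
    intro a b hma hmb hab heq
    simp only [pvToE] at *
    rw [heq]
    exact pvKey_lt_same_fst (hbi a hma) (hbi b hmb) (Or.inr ⟨rfl, hab⟩)
  · intro p hp q hq heq
    simp only [List.mem_map] at hp hq
    obtain ⟨i, hi, rfl⟩ := hp; obtain ⟨j, hj, rfl⟩ := hq
    simp only [pvToE] at *
    rw [heq]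
    exact pvKey_lt_same_fst (hbi i hi) (hbi j hj) (Or.inl (by norm_num))

-- the heart: A's dedup-by-value of the sorted entry list is B's descending distinct
-- values decorated with their first (flag, index) pair
theorem pvCrux (arr1 arr2 : List Int) (n : Int) (hdom : Dom_maximizeArray arr1 arr2 n)
    (hpre : Pre_maximizeArray arr1 arr2 n) :
    pvDedupFst (PySem.List.sorted (pvE arr1 arr2 n) pvKey false) PySem.Set.empty
      = (PySem.List.sorted (PySem.Set.ofList ((pvF arr1 arr2 n).map (fun p => p.1))) (fun v => v) true).map
          (fun v => (-v, ((((pvF arr1 arr2 n).find? (fun p => p.1 == v)).map (fun p => p.2)).getD (0, 0)))) := by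
  set E := pvE arr1 arr2 n with hE
  set F := pvF arr1 arr2 n with hF
  set S := PySem.List.sorted E pvKey false with hS
  set vals := F.map (fun p => p.1) with hvals
  set V := PySem.List.sorted (PySem.Set.ofList vals) (fun v => v) true with hV
  set bp := fun v : Int => (((F.find? (fun p => p.1 == v)).map (fun p => p.2)).getD ((0 : Int), (0 : Int))) with hbp
  have hSperm : S.Perm E := PySem.List.sorted_perm E pvKey false
  have hEbnd := pvE_bnd arr1 arr2 n hdom hpre
  have hSbnd : ∀ x ∈ S, pvBnd x := fun x hx => hEbnd x (hSperm.mem_iff.mp hx)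
  have hEnd := pvE_nodup arr1 arr2 n
  have hSnd : S.Nodup := hSperm.nodup_iff.mpr hEnd
  have hSle : S.Pairwise (fun a b => pvKey a ≤ pvKey b) := PySem.List.sorted_pairwise E pvKey
  have hSlt : S.Pairwise (fun a b => pvKey a < pvKey b) := by
    refine ((hSle.and hSnd).imp_of_mem ?_)
    rintro a b hma hmb ⟨hle, hne⟩
    rcases lt_or_eq_of_le hle with h | h
    · exact h
    · exact absurd (pvKey_inj (hSbnd a hma) (hSbnd b hmb) h) hne
  have hFp := pvF_pairwise arr1 arr2 n hdom
  have hEF : ∀ x, x ∈ E ↔ ∃ p ∈ F, pvToE p = x := by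
    intro x
    rw [← List.mem_map (f := pvToE), ← (pvE_perm_F arr1 arr2 n).mem_iff]
  have hPmem : ∀ x, x ∈ pvDedupFst S PySem.Set.empty ↔
      (x ∈ E ∧ ∀ y ∈ E, y.1 = x.1 → pvKey x ≤ pvKey y) := by
    intro x
    rw [mem_pvDedupFst PySem.Set.empty hSlt x]
    constructor
    · rintro ⟨hxS, _, hmin⟩
      exact ⟨hSperm.mem_iff.mp hxS, fun y hy h1 => hmin y (hSperm.mem_iff.mpr hy) h1⟩
    · rintro ⟨hxE, hmin⟩
      exact ⟨hSperm.mem_iff.mpr hxE, by simp [PySem.Set.empty],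
        fun y hy h1 => hmin y (hSperm.mem_iff.mp hy) h1⟩
  have hfind : ∀ v ∈ vals, ∃ p, F.find? (fun p => p.1 == v) = some p ∧ p ∈ F ∧ p.1 = v ∧
      (∀ q ∈ F, q.1 = v → pvKey (pvToE p) ≤ pvKey (pvToE q)) := by
    intro v hv
    obtain ⟨p0, hp0F, hp0v⟩ := List.mem_map.mp hv
    have hsome : (F.find? (fun p => p.1 == v)).isSome = true :=
      List.find?_isSome.mpr ⟨p0, hp0F, by simpa using hp0v⟩
    obtain ⟨p, hp⟩ := Option.isSome_iff_exists.mp hsome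
    obtain ⟨h1, h2, h3⟩ := find?_min F v hFp p hp
    exact ⟨p, hp, h1, h2, h3⟩
  have hPbp : ∀ v ∈ vals, ((-v, bp v) ∈ E ∧ ∀ y ∈ E, y.1 = -v → pvKey (-v, bp v) ≤ pvKey y) := by
    intro v hv
    obtain ⟨p, hps, hpF, hpv, hmin⟩ := hfind v hv
    have hbpv : bp v = p.2 := by simp [hbp, hps]
    have hx : ((-v, bp v) : Int × Int × Int) = pvToE p := by
      rw [hbpv, pvToE, ← hpv]
    constructor
    · rw [hx]; exact (hEF _).mpr ⟨p, hpF, rfl⟩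
    · intro y hy h1
      obtain ⟨q, hqF, rfl⟩ := (hEF y).mp hy
      have hq1 : q.1 = v := by
        have : (pvToE q).1 = -q.1 := rfl
        omega
      rw [hx]; exact hmin q hqF hq1
  have huniq : ∀ x y : Int × Int × Int,
      (x ∈ E ∧ ∀ z ∈ E, z.1 = x.1 → pvKey x ≤ pvKey z) →
      (y ∈ E ∧ ∀ z ∈ E, z.1 = y.1 → pvKey y ≤ pvKey z) → x.1 = y.1 → x = y := by
    rintro x y ⟨hxE, hxm⟩ ⟨hyE, hym⟩ h1
    exact pvKey_inj (hEbnd x hxE) (hEbnd y hyE)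
      (le_antisymm (hxm y hyE h1.symm) (hym x hxE h1))
  have hVmem : ∀ v, v ∈ V ↔ v ∈ vals := fun v =>
    (PySem.List.mem_sorted _ _ _ v).trans (PySem.Set.mem_ofList vals v)
  have hRmem : ∀ x, x ∈ V.map (fun v => ((-v, bp v) : Int × Int × Int)) ↔
      (x ∈ E ∧ ∀ y ∈ E, y.1 = x.1 → pvKey x ≤ pvKey y) := by
    intro x
    rw [List.mem_map]
    constructor
    · rintro ⟨v, hvV, rfl⟩
      exact hPbp v ((hVmem v).mp hvV)
    · rintro ⟨hxE, hxm⟩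
      have hvv : -x.1 ∈ vals := by
        obtain ⟨p, hpF, rfl⟩ := (hEF x).mp hxE
        have : (pvToE p).1 = -p.1 := rfl
        rw [this, neg_neg]
        exact List.mem_map.mpr ⟨p, hpF, rfl⟩
      refine ⟨-x.1, (hVmem _).mpr hvv, ?_⟩
      have hc := hPbp (-x.1) hvv
      exact huniq _ x ⟨hc.1, by simpa using hc.2⟩ ⟨hxE, hxm⟩ (by simp)
  have hsub := pvDedupFst_sublist S PySem.Set.empty
  have hDp1 : (pvDedupFst S PySem.Set.empty).Pairwise (fun a b => a.1 < b.1) := by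
    refine (List.Pairwise.sublist hsub hSlt).imp_of_mem ?_
    intro a b hma hmb hlt
    have hle := pvKey_fst_le (hSbnd a (hsub.subset hma)) (hSbnd b (hsub.subset hmb)) hlt
    rcases eq_or_lt_of_le hle with h | h
    · have := huniq a b ((hPmem a).mp hma) ((hPmem b).mp hmb) h
      subst this
      exact absurd hlt (lt_irrefl _)
    · exact h
  have hVnd : V.Nodup := (PySem.List.sorted_perm _ _ _).nodup_iff.mpr (PySem.Set.nodup_ofList vals)
  have hVge : V.Pairwise (fun a b => b ≤ a) := PySem.List.sorted_pairwise_rev _ _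
  have hRp1 : (V.map (fun v => ((-v, bp v) : Int × Int × Int))).Pairwise (fun a b => a.1 < b.1) := by
    rw [List.pairwise_map]
    refine ((hVge.and hVnd).imp ?_)
    rintro a b ⟨hle, hne⟩
    have : b < a := lt_of_le_of_ne hle (Ne.symm hne)
    simpa using this
  have hDnd : (pvDedupFst S PySem.Set.empty).Nodup := hsub.nodup hSnd
  have hRnd : (V.map (fun v => ((-v, bp v) : Int × Int × Int))).Nodup :=
    hRp1.imp (fun {a b} h heq => by rw [heq] at h; exact lt_irrefl _ h)
  have hperm : (pvDedupFst S PySem.Set.empty).Perm (V.map (fun v => ((-v, bp v) : Int × Int × Int))) :=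
    (List.perm_ext_iff_of_nodup hDnd hRnd).mpr (fun x => (hPmem x).trans (hRmem x).symm)
  exact hperm.eq_of_pairwise (fun a b _ _ h1 h2 => by omega) hDp1 hRp1

theorem pvBp_mem (arr1 arr2 : List Int) (n v : Int)
    (hv : v ∈ (pvF arr1 arr2 n).map (fun p => p.1)) :
    ((-v, ((((pvF arr1 arr2 n).find? (fun p => p.1 == v)).map (fun p => p.2)).getD (0, 0))) : Int × Int × Int)
      ∈ pvE arr1 arr2 n := by
  obtain ⟨p0, hp0F, hp0v⟩ := List.mem_map.mp hv
  have hsome : ((pvF arr1 arr2 n).find? (fun p => p.1 == v)).isSome = true :=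
    List.find?_isSome.mpr ⟨p0, hp0F, by simpa using hp0v⟩
  obtain ⟨p, hp⟩ := Option.isSome_iff_exists.mp hsome
  have hpv : p.1 = v := by simpa using List.find?_some hp
  have hpF : p ∈ pvF arr1 arr2 n := List.mem_of_find?_eq_some hp
  have hx : ((-v, ((((pvF arr1 arr2 n).find? (fun p => p.1 == v)).map (fun p => p.2)).getD (0, 0))) : Int × Int × Int)
      = pvToE p := by
    rw [hp]; simp [pvToE, ← hpv]
  rw [hx, (pvE_perm_F arr1 arr2 n).mem_iff]
  exact List.mem_map.mpr ⟨p, hpF, rfl⟩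

theorem pvE_shape (arr1 arr2 : List Int) (n : Int) :
    ∀ x ∈ pvE arr1 arr2 n,
      ((x = (-(PySem.List.pyGetD arr2 x.2.2 0), 0, x.2.2) ∨ x = (-(PySem.List.pyGetD arr1 x.2.2 0), 1, x.2.2))
        ∧ 0 ≤ x.2.2 ∧ x.2.2 < n) := by
  intro x hx
  rcases (pvE_mem arr1 arr2 n x).mp hx with ⟨i, ⟨h0, h1⟩, rfl | rfl⟩ <;> simp_all

-- ===== VERDICT (by name: the statement is the Claim_ definition above) =====
theorem maximizeArray_spec : Claim_equal_maximizeArray := by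
  intro arr1 arr2 n hdom hpre
  show maximizeArray arr1 arr2 n = maximizeArray_alt arr1 arr2 n
  by_cases hn : 0 ≤ n
  · -- notation
    have hn31 : n ≤ 2147483648 := by
      unfold Dom_maximizeArray at hdom
      simp only [Bool.and_eq_true] at hdom
      exact (by simpa [pvDomInt] using hdom.2 : -2147483648 ≤ n ∧ n ≤ 2147483648).2
    set g2 := fun i : Int => PySem.List.pyGetD arr2 i 0 with hg2
    set g1 := fun i : Int => PySem.List.pyGetD arr1 i 0 with hg1
    set F := pvF arr1 arr2 n with hF
    set E := pvE arr1 arr2 n with hE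
    set vals := F.map (fun p => p.1) with hvals
    set V := PySem.List.sorted (PySem.Set.ofList vals) (fun v => v) true with hV
    set bp := fun v : Int => (((F.find? (fun p => p.1 == v)).map (fun p => p.2)).getD ((0 : Int), (0 : Int))) with hbp
    set W := V.take n.toNat with hW
    set T := W.map (fun v => ((-v, bp v) : Int × Int × Int)) with hT
    -- ===== reduce A =====
    have hheap : ((PySem.List.pyRange 0 n 1).foldl
        (fun h i => pvHeapPush (pvHeapPush h (-(PySem.List.pyGetD arr2 i 0), 0, i)) (-(PySem.List.pyGetD arr1 i 0), 1, i)) [])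
        = PySem.List.sorted E pvKey false := by
      rw [foldl_double, PySem.List.sorted_eq_foldl_insertBy]
      rfl
    have hflags : ∀ e ∈ PySem.List.sorted E pvKey false, e.2.1 = 0 ∨ e.2.1 = 1 := by
      intro e he
      have hmem := (PySem.List.mem_sorted _ _ _ e).mp he
      rcases (pvE_mem arr1 arr2 n e).mp hmem with ⟨i, _, h | h⟩ <;> subst h <;> simp
    have hAT : pvDedupFst (PySem.List.sorted E pvKey false) PySem.Set.empty = V.map (fun v => ((-v, bp v) : Int × Int × Int)) :=
      pvCrux arr1 arr2 n hdom hpre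
    have hA : maximizeArray arr1 arr2 n =
        ((PySem.List.sorted ((T.filter (fun e => e.2.1 == 0)).map (fun e => e.2.2)) (fun x => x) false).map g2)
        ++ ((PySem.List.sorted ((T.filter (fun e => e.2.1 == 1)).map (fun e => e.2.2)) (fun x => x) false).map g1) := by
      simp only [maximizeArray]
      rw [hheap, pvPopLoop_eq n _ 0 PySem.Set.empty [] [] hflags]
      simp only [List.nil_append]
      rw [pvSel_eq_take_dedup, sub_zero, hAT, ← List.map_take, ← hW, ← hT]
      rw [PySem.List.foldl_append_singleton_eq_map, PySem.List.foldl_append_singleton_eq_map]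
      simp only [List.nil_append]
      rfl
    -- ===== reduce B =====
    have hbest : ((PySem.List.pyRange 0 n 1).foldl
          (fun d i => PySem.Dict.setdefault d (PySem.List.pyGetD arr1 i 0) (1, i))
          ((PySem.List.pyRange 0 n 1).foldl
            (fun d i => PySem.Dict.setdefault d (PySem.List.pyGetD arr2 i 0) (0, i)) PySem.Dict.empty))
        = F.foldl (fun d p => PySem.Dict.setdefault d p.1 p.2) PySem.Dict.empty := by
      rw [hF, pvF, List.foldl_append, List.foldl_map, List.foldl_map]
    have hgetD : ∀ v : Int,
        PySem.Dict.getD (F.foldl (fun d p => PySem.Dict.setdefault d p.1 p.2) PySem.Dict.empty) v ((0 : Int), (0 : Int)) = bp v := by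
      intro v
      rw [PySem.Dict.getD_eq_get?_getD, get?_foldl_setdefault]
      simp [hbp]
    have hkeys : (F.foldl (fun d p => PySem.Dict.setdefault d p.1 p.2) PySem.Dict.empty).keys = PySem.Set.ofList vals :=
      keys_foldl_setdefault F
    have hB : maximizeArray_alt arr1 arr2 n =
        (PySem.List.sorted (W.map (fun v => (((bp v).1, (bp v).2, v) : Int × Int × Int))) pvKeyB false).map (fun t => t.2.2) := by
      simp only [maximizeArray_alt]
      rw [hbest, hkeys, ← hV, PySem.List.slice_to _ hn, ← hW]
      congr 2
      refine List.map_congr_left ?_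
      intro v hv
      rw [hgetD v]
    -- ===== the chosen triples, sorted, split into the two blocks =====
    have hTE : ∀ x ∈ T, x ∈ E := by
      intro x hx
      obtain ⟨v, hvW, rfl⟩ := List.mem_map.mp hx
      have hvv : v ∈ vals := by
        have := List.take_subset _ _ hvW
        exact (PySem.Set.mem_ofList vals v).mp ((PySem.List.mem_sorted _ _ _ v).mp this)
      exact pvBp_mem arr1 arr2 n v hvv
    have hshape := pvE_shape arr1 arr2 n
    have hEbnd := pvE_bnd arr1 arr2 n hdom hpre
    have hVnd : V.Nodup := (PySem.List.sorted_perm _ _ _).nodup_iff.mpr (PySem.Set.nodup_ofList vals)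
    have hWnd : W.Nodup := (List.take_sublist _ _).nodup hVnd
    have hTnd : T.Nodup := by
      refine List.Nodup.map_on ?_ hWnd
      intro a _ b _ h
      have := congrArg (fun t : Int × Int × Int => t.1) h
      simpa using this
    -- Dom bounds on the two arrays
    have hdomAB : (arr1.all (fun y => pvDomInt y) = true) ∧ (arr2.all (fun y => pvDomInt y) = true) := by
      unfold Dom_maximizeArray at hdom
      simp only [Bool.and_eq_true] at hdom
      exact ⟨hdom.1.1, hdom.1.2⟩
    have hval2 : ∀ a : Int, 0 ≤ a → a < n → -2147483648 ≤ g2 a ∧ g2 a ≤ 2147483648 :=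
      fun a h0 h1 => pvVal_bnd arr2 hdomAB.2 h0 (lt_of_lt_of_le h1 hpre.2)
    have hval1 : ∀ a : Int, 0 ≤ a → a < n → -2147483648 ≤ g1 a ∧ g1 a ≤ 2147483648 :=
      fun a h0 h1 => pvVal_bnd arr1 hdomAB.1 h0 (lt_of_lt_of_le h1 hpre.1)
    have hTshape : ∀ e ∈ T, (e = (-(g2 e.2.2), 0, e.2.2) ∨ e = (-(g1 e.2.2), 1, e.2.2)) ∧ 0 ≤ e.2.2 ∧ e.2.2 < n :=
      fun e he => hshape e (hTE e he)
    set I2 := (T.filter (fun e => e.2.1 == 0)).map (fun e => (e : Int × Int × Int).2.2) with hI2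
    set I1 := (T.filter (fun e => e.2.1 == 1)).map (fun e => (e : Int × Int × Int).2.2) with hI1
    set t0 := fun i : Int => (((0 : Int), i, g2 i) : Int × Int × Int) with ht0
    set t1 := fun i : Int => (((1 : Int), i, g1 i) : Int × Int × Int) with ht1
    have hsh0 : ∀ e ∈ T.filter (fun e => e.2.1 == 0), e = (-(g2 (e : Int × Int × Int).2.2), 0, e.2.2) := by
      intro e he
      obtain ⟨heT, hef⟩ := List.mem_filter.mp he
      rcases (hTshape e heT).1 with h | h
      · exact h
      · exfalso
        have : e.2.1 = 1 := by rw [h]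
        simp [this] at hef
    have hsh1 : ∀ e ∈ T.filter (fun e => e.2.1 == 1), e = (-(g1 (e : Int × Int × Int).2.2), 1, e.2.2) := by
      intro e he
      obtain ⟨heT, hef⟩ := List.mem_filter.mp he
      rcases (hTshape e heT).1 with h | h
      · exfalso
        have : e.2.1 = 0 := by rw [h]
        simp [this] at hef
      · exact h
    have hIdx0 : ∀ a ∈ I2, 0 ≤ a ∧ a < n := by
      intro a ha
      obtain ⟨e, he, rfl⟩ := List.mem_map.mp ha
      exact (hTshape e (List.mem_filter.mp he).1).2
    have hIdx1 : ∀ a ∈ I1, 0 ≤ a ∧ a < n := by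
      intro a ha
      obtain ⟨e, he, rfl⟩ := List.mem_map.mp ha
      exact (hTshape e (List.mem_filter.mp he).1).2
    have hI2nd : I2.Nodup := by
      refine List.Nodup.map_on ?_ (hTnd.filter _)
      intro e he e' he' hee
      rw [hsh0 e he, hsh0 e' he', hee]
    have hI1nd : I1.Nodup := by
      refine List.Nodup.map_on ?_ (hTnd.filter _)
      intro e he e' he' hee
      rw [hsh1 e he, hsh1 e' he', hee]
    -- the sorted triples split into the two blocks
    have hf0 : (T.filter (fun e => e.2.1 == 0)).map (fun e => ((e.2.1, e.2.2, -e.1) : Int × Int × Int)) = I2.map t0 := by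
      rw [hI2, List.map_map]
      refine List.map_congr_left ?_
      intro e he
      rw [hsh0 e he]
      simp [ht0]
    have hf1 : (T.filter (fun e => e.2.1 == 1)).map (fun e => ((e.2.1, e.2.2, -e.1) : Int × Int × Int)) = I1.map t1 := by
      rw [hI1, List.map_map]
      refine List.map_congr_left ?_
      intro e he
      rw [hsh1 e he]
      simp [ht1]
    have hff : T.filter (fun e => !(e.2.1 == 0)) = T.filter (fun e => e.2.1 == 1) := by
      refine List.filter_congr ?_
      intro e he
      rcases (hTshape e he).1 with h | h
      · have : e.2.1 = 0 := by rw [h]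
        simp [this]
      · have : e.2.1 = 1 := by rw [h]
        simp [this]
    have hperm : ((PySem.List.sorted I2 (fun x => x) false).map t0 ++ (PySem.List.sorted I1 (fun x => x) false).map t1).Perm
        (T.map (fun e => ((e.2.1, e.2.2, -e.1) : Int × Int × Int))) := by
      refine List.Perm.trans (List.Perm.append ((PySem.List.sorted_perm I2 _ _).map t0) ((PySem.List.sorted_perm I1 _ _).map t1)) ?_
      rw [← hf0, ← hf1, ← hff, ← List.map_append]
      exact (List.filter_append_perm _ T).map _
    have hpair : ((PySem.List.sorted I2 (fun x => x) false).map t0 ++ (PySem.List.sorted I1 (fun x => x) false).map t1).Pairwise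
        (fun a b => pvKeyB a < pvKeyB b) := by
      have hmem2 : ∀ a ∈ PySem.List.sorted I2 (fun x => x) false, 0 ≤ a ∧ a < n :=
        fun a ha => hIdx0 a ((PySem.List.mem_sorted _ _ _ a).mp ha)
      have hmem1 : ∀ a ∈ PySem.List.sorted I1 (fun x => x) false, 0 ≤ a ∧ a < n :=
        fun a ha => hIdx1 a ((PySem.List.mem_sorted _ _ _ a).mp ha)
      rw [List.pairwise_append]
      refine ⟨?_, ?_, ?_⟩
      · rw [List.pairwise_map]
        have hnd' : (PySem.List.sorted I2 (fun x => x) false).Nodup :=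
          (PySem.List.sorted_perm _ _ _).nodup_iff.mpr hI2nd
        have hle := PySem.List.sorted_pairwise I2 (fun x => x)
        refine ((hle.and hnd').imp_of_mem ?_)
        rintro a b hma hmb ⟨hab, hne⟩
        have ha := hmem2 a hma
        have hb := hmem2 b hmb
        exact pvKeyB_lt (hval2 a ha.1 ha.2) (hval2 b hb.1 hb.2)
          ⟨ha.1, by omega⟩ ⟨hb.1, by omega⟩ (Or.inr ⟨rfl, lt_of_le_of_ne hab hne⟩)
      · rw [List.pairwise_map]
        have hnd' : (PySem.List.sorted I1 (fun x => x) false).Nodup :=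
          (PySem.List.sorted_perm _ _ _).nodup_iff.mpr hI1nd
        have hle := PySem.List.sorted_pairwise I1 (fun x => x)
        refine ((hle.and hnd').imp_of_mem ?_)
        rintro a b hma hmb ⟨hab, hne⟩
        have ha := hmem1 a hma
        have hb := hmem1 b hmb
        exact pvKeyB_lt (hval1 a ha.1 ha.2) (hval1 b hb.1 hb.2)
          ⟨ha.1, by omega⟩ ⟨hb.1, by omega⟩ (Or.inr ⟨rfl, lt_of_le_of_ne hab hne⟩)
      · intro x hx y hy
        obtain ⟨a, hma, rfl⟩ := List.mem_map.mp hx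
        obtain ⟨b, hmb, rfl⟩ := List.mem_map.mp hy
        have ha := hmem2 a hma
        have hb := hmem1 b hmb
        exact pvKeyB_lt (hval2 a ha.1 ha.2) (hval1 b hb.1 hb.2)
          ⟨ha.1, by omega⟩ ⟨hb.1, by omega⟩ (Or.inl (by norm_num))
    have hchosen : PySem.List.sorted (T.map (fun e => ((e.2.1, e.2.2, -e.1) : Int × Int × Int))) pvKeyB false
        = (PySem.List.sorted I2 (fun x => x) false).map t0 ++ (PySem.List.sorted I1 (fun x => x) false).map t1 :=
      PySem.List.sorted_eq_of_perm_of_pairwise_lt _ _ pvKeyB hperm hpair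
    have hWmap : W.map (fun v => (((bp v).1, (bp v).2, v) : Int × Int × Int))
        = T.map (fun e => ((e.2.1, e.2.2, -e.1) : Int × Int × Int)) := by
      rw [hT, List.map_map]
      refine (List.map_congr_left ?_).symm
      intro v _
      simp
    rw [hA, hB, hWmap, hchosen, List.map_append, List.map_map, List.map_map]
    rfl
  · have hr : PySem.List.pyRange 0 n 1 = [] := PySem.List.pyRange_one_eq_nil (by omega)
    have hnlt : ¬ ((0 : Int) < n) := by omega
    simp [maximizeArray, maximizeArray_alt, hr, pvPopLoop, hnlt, PySem.List.slice,
      show PySem.List.sorted ([] : List Int) (fun x => x) true = [] from rfl,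
      show PySem.List.sorted ([] : List Int) (fun x => x) false = [] from rfl,
      show PySem.List.sorted ([] : List (Int × Int × Int)) pvKeyB false = [] from rfl]
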